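-- pv_equiv track=rewrite | github.com/Hongbo-Chu/gcn_final | maintrain/.ipynb_checkpoints/construct_graph-checkpoint.py | neighbor_idx
-- ===== SOURCE A (Python) =====
-- def neighbor_idx(node_idx, wsi, n):
--     """用于找一个点周围邻居的idx
--         args:
--             node_idx:要找邻居的点的idx
--             wsi:  {idx: (name, (x_true, y_true), (x, y))}
--             n:找几圈邻居
--         returns：
--             邻居的idx，列表形式
--     """
--     pos_dict = {}
--     for i in range(len(wsi)):
--         pos = wsi[i][2]
--         label = wsi[i][1]
--         pos_dict[tuple(pos)] = i
--
--     neighbor_idx = []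
--     pos = wsi[node_idx][2]#当前点的坐标
--     for i in range(pos[0]-n, pos[0]+n+1):
--         for j in range(pos[1]-n, pos[1]+n+1):
--             if (i, j) in pos_dict:
--                 neighbor_idx.append(pos_dict[(i, j)])
--     return neighbor_idx
-- ===== SOURCE B (Python) =====
-- def neighbor_idx(node_idx, wsi, n):
--     """Same result as A: indices of nodes whose position wsi[i][2] lies in the
--     (2n+1)x(2n+1) box around wsi[node_idx][2], in row-major (i asc, then j asc)
--     order, duplicate positions collapsed to the last index.  Instead of scanning
--     the (2n+1)^2 grid cells, filter the dict entries by box membership and sort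
--     them by position."""
--     pos_dict = {}
--     for i in range(len(wsi)):
--         pos_dict[tuple(wsi[i][2])] = i
--     x0, y0 = wsi[node_idx][2]
--     hits = [(key, idx) for key, idx in pos_dict.items()
--             if x0 - n <= key[0] <= x0 + n and y0 - n <= key[1] <= y0 + n]
--     hits.sort(key=lambda p: (p[0][0], p[0][1]))
--     return [idx for key, idx in hits]
-- ===== Notes on version B (the rewrite author's own statement) =====
-- stated objective: alternative
-- what changed: Replaces the nested scan over all (2n+1)^2 grid cells with a single filter of the position-dict entries by box membership followed by a lexicographic sort by position, so cost depends on the number of nodes instead of the grid area.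
import Mathlib
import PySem

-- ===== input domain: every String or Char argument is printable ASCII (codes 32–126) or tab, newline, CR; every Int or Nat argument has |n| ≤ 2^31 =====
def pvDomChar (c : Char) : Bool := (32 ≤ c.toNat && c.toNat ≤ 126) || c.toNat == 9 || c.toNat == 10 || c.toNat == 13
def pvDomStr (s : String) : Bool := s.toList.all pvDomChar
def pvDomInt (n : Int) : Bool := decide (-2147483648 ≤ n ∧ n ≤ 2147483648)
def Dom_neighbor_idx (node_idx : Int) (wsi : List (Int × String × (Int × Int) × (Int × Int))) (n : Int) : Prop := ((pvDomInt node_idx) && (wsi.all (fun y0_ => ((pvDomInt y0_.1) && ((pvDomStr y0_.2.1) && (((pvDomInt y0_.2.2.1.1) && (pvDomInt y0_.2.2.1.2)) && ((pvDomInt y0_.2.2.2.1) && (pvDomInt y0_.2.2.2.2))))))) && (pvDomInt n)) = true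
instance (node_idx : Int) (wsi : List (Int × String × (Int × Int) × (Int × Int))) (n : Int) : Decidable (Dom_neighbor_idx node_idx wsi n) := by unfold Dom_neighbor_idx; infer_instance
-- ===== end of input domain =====

-- B filters the position-dict entries by box membership and sorts them by position,
-- instead of A's nested scan over all (2n+1)^2 grid cells; same return value on Pre_ (node_idx a valid index).


-- ===== PORT A =====
-- wsi is a Python dict {idx: (name, (x_true, y_true), (x, y))} → assoc list; Python dict semantics via PySem.Dict.ofList.
-- pos_dict: for i in range(len(wsi)): pos_dict[tuple(wsi[i][2])] = i  (wsi[i] raising KeyError is excluded by Pre_)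
def pvPosDict (w : PySem.Dict Int (String × (Int × Int) × (Int × Int))) : PySem.Dict (Int × Int) Int :=
  (PySem.List.pyRange 0 w.size 1).foldl (fun d i =>
    match w.get? i with
    | some v => d.insert v.2.2 i
    | none => d  -- KeyError in Python; excluded by Pre_
    ) PySem.Dict.empty

def neighbor_idx (node_idx : Int) (wsi : List (Int × String × (Int × Int) × (Int × Int))) (n : Int) : List Int :=
  let w := PySem.Dict.ofList wsi
  let pos_dict := pvPosDict w
  match w.get? node_idx with
  | none => []  -- KeyError on wsi[node_idx]; excluded by Pre_
  | some node =>
    let pos := node.2.2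
    (PySem.List.pyRange (pos.1 - n) (pos.1 + n + 1) 1).foldl (fun acc i =>
      (PySem.List.pyRange (pos.2 - n) (pos.2 + n + 1) 1).foldl (fun acc j =>
        if pos_dict.contains (i, j) then acc ++ [pos_dict.getD (i, j) 0] else acc) acc) []

-- ===== PORT B =====
-- the comprehension's box test: x0-n <= key[0] <= x0+n and y0-n <= key[1] <= y0+n
def pvInBox (x0 y0 n : Int) (p : (Int × Int) × Int) : Bool :=
  decide (x0 - n ≤ p.1.1) && decide (p.1.1 ≤ x0 + n) && decide (y0 - n ≤ p.1.2) && decide (p.1.2 ≤ y0 + n)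

def neighbor_idx_alt (node_idx : Int) (wsi : List (Int × String × (Int × Int) × (Int × Int))) (n : Int) : List Int :=
  let w := PySem.Dict.ofList wsi
  let pos_dict := pvPosDict w
  match w.get? node_idx with
  | none => []  -- KeyError on wsi[node_idx]; excluded by Pre_
  | some node =>
    let x0 := node.2.2.1
    let y0 := node.2.2.2
    let hits := pos_dict.items.filter (pvInBox x0 y0 n)
    (PySem.List.sorted2 hits (fun p => p.1.1) (fun p => p.1.2)).map (fun p => p.2)

-- ===== PRECONDITION & SPEC =====
-- Pre_ excludes exactly the inputs where A raises KeyError: the dict's keys must include 0..len(wsi)-1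
-- (read in the pos_dict loop) and node_idx (both A and B raise there).
def Pre_neighbor_idx (node_idx : Int) (wsi : List (Int × String × (Int × Int) × (Int × Int))) (n : Int) : Prop :=
  (∀ i ∈ PySem.List.pyRange 0 (PySem.Dict.ofList wsi).size 1, (PySem.Dict.ofList wsi).contains i = true) ∧
    (PySem.Dict.ofList wsi).contains node_idx = true
instance (node_idx : Int) (wsi : List (Int × String × (Int × Int) × (Int × Int))) (n : Int) : Decidable (Pre_neighbor_idx node_idx wsi n) := by unfold Pre_neighbor_idx; infer_instance

def pvWitness_neighbor_idx : Int × (List (Int × String × (Int × Int) × (Int × Int))) × Int :=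
  (0, [(0, "a", (1, 2), (0, 0)), (1, "b", (2, 2), (0, 1))], 1)

def Spec_neighbor_idx (node_idx : Int) (wsi : List (Int × String × (Int × Int) × (Int × Int))) (n : Int) (out : List Int) : Prop := out = neighbor_idx_alt node_idx wsi n
instance (node_idx : Int) (wsi : List (Int × String × (Int × Int) × (Int × Int))) (n : Int) (out : List Int) : Decidable (Spec_neighbor_idx node_idx wsi n out) := by unfold Spec_neighbor_idx; infer_instance

-- ===== CLAIM (what is proved, stated in full; the proofs are below) =====
def Claim_equal_neighbor_idx : Prop := ∀ (node_idx : Int) (wsi : List (Int × String × (Int × Int) × (Int × Int))) (n : Int), Dom_neighbor_idx node_idx wsi n → Pre_neighbor_idx node_idx wsi n → Spec_neighbor_idx node_idx wsi n (neighbor_idx node_idx wsi n)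

-- ===== LEMMAS AND PROOFS =====

-- sorted2 with two Int keys is sorted with the lexicographic key
theorem pv_sorted2_eq_sorted_lex {α : Type} (xs : List α) (k1 k2 : α → Int) :
    PySem.List.sorted2 xs k1 k2 = PySem.List.sorted xs (fun a => toLex (k1 a, k2 a)) := by
  have hb : (fun a b => decide (k1 a < k1 b) || (!decide (k1 b < k1 a) && decide (k2 a < k2 b)))
      = (fun (a b : α) => decide (toLex (k1 a, k2 a) < toLex (k1 b, k2 b))) := by
    funext a b
    rcases lt_trichotomy (k1 a) (k1 b) with h | h | h <;>
      simp [Prod.Lex.toLex_lt_toLex, h, lt_asymm]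
  unfold PySem.List.sorted2 PySem.List.sorted
  simp only [Bool.false_eq_true, if_false, hb]

theorem pv_nodup_items {κ ν : Type} [BEq κ] (d : PySem.Dict κ ν) (h : d.keys.Nodup) :
    d.items.Nodup := by
  simp only [PySem.Dict.keys] at h
  exact List.Nodup.of_map _ h

-- the key fact: A's grid scan equals B's filter-then-sort, for any dict with Nodup keys
theorem pv_grid_eq_sorted (d : PySem.Dict (Int × Int) Int) (hnd : d.keys.Nodup) (x0 y0 n : Int) :
    ((PySem.List.pyRange (x0 - n) (x0 + n + 1) 1).foldl (fun acc i =>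
      (PySem.List.pyRange (y0 - n) (y0 + n + 1) 1).foldl (fun acc j =>
        if d.contains (i, j) then acc ++ [d.getD (i, j) 0] else acc) acc) [])
    = (PySem.List.sorted2 (d.items.filter (pvInBox x0 y0 n)) (fun p => p.1.1) (fun p => p.1.2)).map (fun p => p.2) := by
  -- the grid-order list of (position, index) pairs
  set ys : List ((Int × Int) × Int) :=
    (PySem.List.pyRange (x0 - n) (x0 + n + 1) 1).flatMap (fun i =>
      ((PySem.List.pyRange (y0 - n) (y0 + n + 1) 1).filter (fun j => d.contains (i, j))).map
        (fun j => ((i, j), d.getD (i, j) 0))) with hys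
  have hpw : ys.Pairwise (fun a b => toLex (a.1.1, a.1.2) < toLex (b.1.1, b.1.2)) := by
    rw [hys, List.pairwise_flatMap]
    constructor
    · intro i _
      rw [List.pairwise_map]
      refine ((PySem.List.pairwise_lt_pyRange_one _ _).filter _).imp ?_
      intro a b hab
      simp [Prod.Lex.toLex_lt_toLex, hab]
    · refine (PySem.List.pairwise_lt_pyRange_one _ _).imp ?_
      intro a b hab x hx y hy
      simp only [List.mem_map, List.mem_filter] at hx hy
      obtain ⟨jx, _, rfl⟩ := hx
      obtain ⟨jy, _, rfl⟩ := hy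
      simp [Prod.Lex.toLex_lt_toLex, hab]
  have hysnd : ys.Nodup := by
    refine hpw.imp ?_
    intro a b hab
    rintro rfl
    exact lt_irrefl _ hab
  have hperm : ys.Perm (d.items.filter (pvInBox x0 y0 n)) := by
    rw [List.perm_ext_iff_of_nodup hysnd ((pv_nodup_items d hnd).filter _)]
    intro p
    simp only [hys, List.mem_flatMap, List.mem_map, List.mem_filter,
      PySem.List.mem_pyRange_one, pvInBox, Bool.and_eq_true, decide_eq_true_eq]
    constructor
    · rintro ⟨i, hi, j, ⟨hj, hc⟩, rfl⟩
      have := PySem.Dict.contains_eq_isSome_get? d (i, j)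
      rw [hc] at this
      obtain ⟨v, hv⟩ := Option.isSome_iff_exists.mp this.symm
      have hmem : ((i, j), v) ∈ d.items := (PySem.Dict.get?_eq_some_iff_mem_items d _ _ hnd).mp hv
      have hgd : d.getD (i, j) 0 = v := PySem.Dict.getD_of_mem_items d hmem hnd 0
      rw [hgd]
      refine ⟨hmem, ?_⟩
      dsimp only
      omega
    · rintro ⟨hmem, hbox⟩
      obtain ⟨⟨ki, kj⟩, v⟩ := p
      dsimp only at hbox ⊢
      have hv : d.get? (ki, kj) = some v := (PySem.Dict.get?_eq_some_iff_mem_items d _ _ hnd).mpr hmem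
      have hc : d.contains (ki, kj) = true := by
        rw [PySem.Dict.contains_eq_isSome_get?, hv]; rfl
      have hgd : d.getD (ki, kj) 0 = v := PySem.Dict.getD_of_mem_items d hmem hnd 0
      exact ⟨ki, ⟨by omega, by omega⟩, kj, ⟨⟨by omega, by omega⟩, hc⟩, by rw [hgd]⟩
  -- LHS: collapse the two appending loops into ys.map (·.2)
  have hlhs : ((PySem.List.pyRange (x0 - n) (x0 + n + 1) 1).foldl (fun acc i =>
      (PySem.List.pyRange (y0 - n) (y0 + n + 1) 1).foldl (fun acc j =>
        if d.contains (i, j) then acc ++ [d.getD (i, j) 0] else acc) acc) [])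
      = ys.map (fun p => p.2) := by
    simp only [PySem.List.foldl_append_if, PySem.List.foldl_append_eq_flatMap,
      List.nil_append, hys, List.map_flatMap, List.map_map]
    rfl
  rw [hlhs, pv_sorted2_eq_sorted_lex,
    PySem.List.sorted_eq_of_perm_of_pairwise_lt _ ys _ hperm hpw]

theorem pv_posDict_nodup_aux (w : PySem.Dict Int (String × (Int × Int) × (Int × Int))) (l : List Int) :
    ∀ d : PySem.Dict (Int × Int) Int, d.keys.Nodup →
      (l.foldl (fun d i =>
        match w.get? i with
        | some v => d.insert v.2.2 i
        | none => d) d).keys.Nodup := by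
  induction l with
  | nil => exact fun d h => h
  | cons i t ih =>
      intro d hd
      simp only [List.foldl_cons]
      cases w.get? i with
      | none => exact ih d hd
      | some v => exact ih _ (PySem.Dict.nodup_keys_insert d _ _ hd)

theorem pv_posDict_nodup (w : PySem.Dict Int (String × (Int × Int) × (Int × Int))) :
    (pvPosDict w).keys.Nodup :=
  pv_posDict_nodup_aux w _ PySem.Dict.empty PySem.Dict.nodup_keys_empty


-- ===== VERDICT (by name: the statement is the Claim_ definition above) =====
theorem neighbor_idx_spec : Claim_equal_neighbor_idx := by
  intro node_idx wsi n _ hpre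
  unfold Spec_neighbor_idx neighbor_idx neighbor_idx_alt
  cases h : (PySem.Dict.ofList wsi).get? node_idx with
  | none =>
    have := hpre.2
    rw [PySem.Dict.contains_eq_isSome_get?, h] at this
    exact absurd this (by simp)
  | some node =>
    simpa only [h] using pv_grid_eq_sorted (pvPosDict (PySem.Dict.ofList wsi))
      (pv_posDict_nodup (PySem.Dict.ofList wsi)) node.2.2.1 node.2.2.2 n
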